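-- pv_equiv track=rewrite | github.com/mclines/ChessProject | parseWins.py | removeExtra
-- ===== SOURCE A (Python) =====
-- def removeExtra(game):
--     endCharacters = [' ', '+' ,'#']
--     output = list()
--     for index1, char1 in enumerate(game):
--         if char1 == '.':
--             for index2, char2 in enumerate(game[index1:]):
--                 if char2 in endCharacters:
--                     start, end = index1 + 1, index2 + index1
--                     move = game[start:end]
--                     output.append(move)
--                     break
--     return output
-- ===== SOURCE B (Python) =====
-- def removeExtra(game):
--     # Jump between dots with C-level str.find, lazily tracking the next
--     # end-character index; each scanned region is disjoint, so O(n) amortized.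
--     out = []
--     nxt = -1
--     i = game.find('.')
--     while i != -1:
--         if nxt < i:
--             cand = [k for k in (game.find(' ', i), game.find('+', i), game.find('#', i)) if k != -1]
--             if not cand:
--                 return out
--             nxt = min(cand)
--         out.append(game[i + 1:nxt])
--         i = game.find('.', i + 1)
--     return out
-- ===== Notes on version B (the rewrite author's own statement) =====
-- stated objective: faster
-- what changed: Instead of A's per-dot forward rescan with nested Python loops, B jumps between dot positions with str.find and lazily memoizes the next end-character index, so each region of the string is scanned by at most one C-level find; amortized one pass.
import Mathlib
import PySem

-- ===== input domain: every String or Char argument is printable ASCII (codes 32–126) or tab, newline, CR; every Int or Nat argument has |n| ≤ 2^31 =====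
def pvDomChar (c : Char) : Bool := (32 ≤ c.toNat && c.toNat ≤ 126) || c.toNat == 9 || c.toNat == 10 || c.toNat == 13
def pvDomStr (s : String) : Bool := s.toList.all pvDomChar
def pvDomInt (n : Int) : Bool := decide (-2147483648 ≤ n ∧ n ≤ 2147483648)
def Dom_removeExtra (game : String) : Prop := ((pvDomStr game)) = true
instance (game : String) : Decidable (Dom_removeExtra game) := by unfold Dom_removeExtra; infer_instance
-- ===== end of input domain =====

-- B replaces A's per-dot forward rescan by find-driven jumps between dots with a
-- lazily memoized next-end-character index (objective: faster).

-- ===== PORT A =====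
-- char2 in endCharacters ([' ', '+', '#'])
def pvIsEnd (c : Char) : Bool := c == ' ' || c == '+' || c == '#'

-- inner loop: enumerate(game[index1:]) with break, returns the first index2 with an end character
def pvInnerA : List Char → Nat → Option Nat
  | [], _ => none
  | c :: rest, j => if pvIsEnd c then some j else pvInnerA rest (j + 1)

-- outer loop: for index1, char1 in enumerate(game)
def pvGoA (cs : List Char) : List Char → Nat → List String
  | [], _ => []
  | c :: rest, i =>
    if c = '.' then
      match pvInnerA (c :: rest) 0 with
      | some j =>
          -- move = game[index1+1 : index2+index1]
          String.ofList (PySem.List.slice cs (some ((i : Int) + 1)) (some ((j : Int) + (i : Int)))) ::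
            pvGoA cs rest (i + 1)
      | none => pvGoA cs rest (i + 1)
    else pvGoA cs rest (i + 1)

def removeExtra (game : String) : List String := pvGoA game.toList game.toList 0

-- ===== PORT B =====
-- the while loop of Source B; the fuel argument only makes the loop total (every
-- iteration moves i to a strictly larger dot position, so cs.length + 1 suffices)
def pvLoopB (cs : List Char) : Nat → Int → Int → List String → List String
  | 0, _, _, out => out
  | fuel + 1, i, nxt, out =>
    if i = -1 then out
    else
      -- 'if nxt < i: recompute from the three finds; if not cand: return out'
      let step : Option Int :=
        if nxt < i then
          let cand := [PySem.Chars.findFrom cs [' '] i, PySem.Chars.findFrom cs ['+'] i,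
                       PySem.Chars.findFrom cs ['#'] i].filter (fun k => k ≠ -1)
          PySem.List.min? cand (fun k => k)
        else some nxt
      match step with
      | none => out
      | some nxt' =>
          -- out.append(game[i+1:nxt]); i = game.find('.', i+1)
          pvLoopB cs fuel (PySem.Chars.findFrom cs ['.'] (i + 1)) nxt'
            (out ++ [String.ofList (PySem.List.slice cs (some (i + 1)) (some nxt'))])

def removeExtra_alt (game : String) : List String :=
  let cs := game.toList
  pvLoopB cs (cs.length + 1) (PySem.Chars.find cs ['.']) (-1) []

-- ===== PRECONDITION & SPEC =====
def Spec_removeExtra (game : String) (out : List String) : Prop := out = removeExtra_alt game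
instance (game : String) (out : List String) : Decidable (Spec_removeExtra game out) := by unfold Spec_removeExtra; infer_instance

-- ===== CLAIM (what is proved, stated in full; the proofs are below) =====
def Claim_equal_removeExtra : Prop := ∀ (game : String), Dom_removeExtra game → Spec_removeExtra game (removeExtra game)

-- ===== LEMMAS AND PROOFS =====

-- Chars.find on a single-character needle is List.findIdx?
theorem pvFindGo_single (c : Char) (s : List Char) (k : Nat) :
    PySem.Chars.find.go [c] s k =
      match List.findIdx? (· == c) s with
      | some j => ((k + j : Nat) : Int)
      | none => -1 := by
  induction s generalizing k with
  | nil => rfl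
  | cons d t ih =>
    rw [PySem.Chars.find.go]
    have hpre : [c].isPrefixOf (d :: t) = (d == c) := by
      simp only [List.isPrefixOf, Bool.and_true]
      by_cases h : c = d
      · subst h; rfl
      · simp [h, Ne.symm h]
    rw [hpre, List.findIdx?_cons]
    by_cases h : d = c
    · simp [h]
    · have hb : (d == c) = false := by simp [h]
      rw [hb]
      simp only [Bool.false_eq_true, if_false, ih (k + 1)]
      cases List.findIdx? (· == c) t with
      | none => rfl
      | some j =>
        simp only [Option.map_some]
        push_cast
        ring

theorem pvFind_single (c : Char) (s : List Char) :
    PySem.Chars.find s [c] =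
      match List.findIdx? (· == c) s with
      | some j => (j : Int)
      | none => -1 := by
  have := pvFindGo_single c s 0
  simpa [PySem.Chars.find] using this

theorem pvFindFrom_single (cs : List Char) (c : Char) (k : Nat) (hk : k ≤ cs.length) :
    PySem.Chars.findFrom cs [c] (k : Int) =
      match List.findIdx? (· == c) (cs.drop k) with
      | some j => ((k + j : Nat) : Int)
      | none => -1 := by
  rw [PySem.Chars.findFrom_natCast cs [c] k hk, pvFind_single]
  cases List.findIdx? (· == c) (cs.drop k) with
  | none => simp
  | some j =>
    simp only []
    split
    · rename_i hcond
      exfalso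
      revert hcond
      push_cast
      intro hcond
      omega
    · push_cast
      ring

-- option-min combining (none = +∞), the spec of B's min-of-three
def pvOMin : Option Nat → Option Nat → Option Nat
  | none, b => b
  | a, none => a
  | some a, some b => some (min a b)

theorem pvOMin_map_succ (a b : Option Nat) :
    pvOMin (a.map (· + 1)) (b.map (· + 1)) = (pvOMin a b).map (· + 1) := by
  cases a <;> cases b <;> simp [pvOMin]

-- first end-character index = min of the three single-character first indices
theorem pvFindIdx_isEnd (t : List Char) :
    List.findIdx? pvIsEnd t =
      pvOMin (pvOMin (List.findIdx? (· == ' ') t) (List.findIdx? (· == '+') t))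
        (List.findIdx? (· == '#') t) := by
  induction t with
  | nil => rfl
  | cons d r ih =>
    simp only [List.findIdx?_cons]
    by_cases h : pvIsEnd d = true
    · have : (d == ' ') = true ∨ (d == '+') = true ∨ (d == '#') = true := by
        simp [pvIsEnd] at h
        rcases h with (h | h) | h <;> simp [h]
      rw [h]
      rcases this with h1 | h1 | h1 <;> rw [h1] <;>
        cases h2 : (d == ' ') <;> cases h3 : (d == '+') <;> cases h4 : (d == '#') <;>
          simp_all <;>
          cases List.findIdx? (· == ' ') r <;> cases List.findIdx? (· == '+') r <;>
            cases List.findIdx? (· == '#') r <;> simp [pvOMin]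
    · have h1 : (d == ' ') = false := by simp [pvIsEnd] at h; simp [h]
      have h2 : (d == '+') = false := by simp [pvIsEnd] at h; simp [h]
      have h3 : (d == '#') = false := by simp [pvIsEnd] at h; simp [h]
      have h0 : pvIsEnd d = false := by simpa using h
      rw [h0, h1, h2, h3]
      simp only [Bool.false_eq_true, if_false, ih, pvOMin_map_succ]

-- the inner A scan is findIdx? of pvIsEnd
theorem pvInnerA_eq_findIdx (s : List Char) (k : Nat) :
    pvInnerA s k = (List.findIdx? pvIsEnd s).map (· + k) := by
  induction s generalizing k with
  | nil => rfl
  | cons c rest ih =>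
    simp only [pvInnerA, List.findIdx?_cons]
    by_cases h : pvIsEnd c = true
    · simp [h]
    · have h' : pvIsEnd c = false := by simpa using h
      rw [h']
      simp only [Bool.false_eq_true, if_false, ih (k + 1), Option.map_map]
      cases List.findIdx? pvIsEnd rest with
      | none => rfl
      | some j => simp; omega

-- A emits nothing on a suffix with no dots
theorem pvGoA_no_dot (cs : List Char) (s : List Char) (i : Nat)
    (h : List.findIdx? (· == '.') s = none) : pvGoA cs s i = [] := by
  rw [List.findIdx?_eq_none_iff] at h
  induction s generalizing i with
  | nil => rfl
  | cons c rest ih =>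
    have hc : ¬ c = '.' := by
      intro hc; have := h c (by simp); simp [hc] at this
    simp only [pvGoA, hc, if_false]
    exact ih (i + 1) (fun x hx => h x (by simp [hx]))

-- A emits nothing on a suffix with no end characters
theorem pvGoA_no_end (cs : List Char) (s : List Char) (i : Nat)
    (h : List.findIdx? pvIsEnd s = none) : pvGoA cs s i = [] := by
  rw [List.findIdx?_eq_none_iff] at h
  induction s generalizing i with
  | nil => rfl
  | cons c rest ih =>
    have hrest : ∀ x ∈ rest, pvIsEnd x = false := fun x hx => h x (by simp [hx])
    have hinner : pvInnerA (c :: rest) 0 = none := by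
      have : ∀ (u : List Char) (k : Nat), (∀ x ∈ u, pvIsEnd x = false) → pvInnerA u k = none := by
        intro u
        induction u with
        | nil => intro k _; rfl
        | cons a b ihb =>
          intro k hu
          simp only [pvInnerA, hu a (by simp), Bool.false_eq_true, if_false]
          exact ihb (k + 1) (fun x hx => hu x (by simp [hx]))
      exact this _ 0 h
    by_cases hc : c = '.'
    · subst hc
      simp [pvGoA, hinner, ih (i + 1) hrest]
    · simp only [pvGoA, hc, if_false]
      exact ih (i + 1) hrest

-- A skips over non-dot characters up to the first dot
theorem pvGoA_skip (cs : List Char) (s : List Char) (i d : Nat)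
    (h : List.findIdx? (· == '.') s = some d) :
    pvGoA cs s i = pvGoA cs (s.drop d) (i + d) := by
  induction s generalizing i d with
  | nil => simp at h
  | cons c rest ih =>
    rw [List.findIdx?_cons] at h
    by_cases hc : c = '.'
    · simp [hc] at h
      subst h
      simp
    · have hb : (c == '.') = false := by simp [hc]
      rw [hb] at h
      simp only [Bool.false_eq_true, if_false] at h
      cases hr : List.findIdx? (· == '.') rest with
      | none => rw [hr] at h; simp at h
      | some d' =>
        rw [hr] at h; simp at h
        subst h
        simp only [pvGoA, hc, if_false, List.drop_succ_cons]
        rw [ih (i + 1) d' hr]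
        congr 1
        omega

-- one dot step of A
theorem pvGoA_dot (cs : List Char) (rest : List Char) (i : Nat) :
    pvGoA cs ('.' :: rest) i =
      (match List.findIdx? pvIsEnd rest with
        | some f => [String.ofList (PySem.List.slice cs (some ((i : Int) + 1)) (some ((i : Int) + 1 + (f : Int))))]
        | none => []) ++ pvGoA cs rest (i + 1) := by
  have hend : pvIsEnd '.' = false := by decide
  have hinner : pvInnerA ('.' :: rest) 0 = pvInnerA rest 1 := by
    simp [pvInnerA, hend]
  simp only [pvGoA, if_pos, hinner, pvInnerA_eq_findIdx rest 1]
  cases List.findIdx? pvIsEnd rest with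
  | none => simp
  | some f =>
    simp only [Option.map_some, List.singleton_append]
    have : ((f + 1 : Nat) : Int) + (i : Int) = (i : Int) + 1 + (f : Int) := by push_cast; ring
    rw [this]

-- the some-case of the dot step
theorem pvGoA_dot_some (cs : List Char) (rest : List Char) (i f : Nat)
    (h : List.findIdx? pvIsEnd rest = some f) :
    pvGoA cs ('.' :: rest) i =
      String.ofList (PySem.List.slice cs (some ((i : Int) + 1)) (some ((i : Int) + 1 + (f : Int)))) ::
        pvGoA cs rest (i + 1) := by
  rw [pvGoA_dot, h]
  rfl

-- shifting the start within the end-free prefix keeps the same first end character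
theorem pvFindIdx_drop_shift (cs : List Char) (a b m : Nat)
    (h : List.findIdx? pvIsEnd (cs.drop a) = some m) (hab : a ≤ b) (hbm : b ≤ a + m) :
    List.findIdx? pvIsEnd (cs.drop b) = some (a + m - b) := by
  rw [List.findIdx?_eq_some_iff_getElem] at h ⊢
  obtain ⟨hlt, hp, hmin⟩ := h
  have hlen : a + m < cs.length := by
    have := hlt; simp [List.length_drop] at this; omega
  have hlt' : a + m - b < (cs.drop b).length := by
    simp [List.length_drop]; omega
  refine ⟨hlt', ?_, ?_⟩
  · have h1 : (cs.drop b)[a + m - b] = cs[b + (a + m - b)]'(by omega) := by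
      simp [List.getElem_drop]
    have h2 : (cs.drop a)[m] = cs[a + m]'(by omega) := by
      simp [List.getElem_drop]
    rw [h1]
    rw [h2] at hp
    have : b + (a + m - b) = a + m := by omega
    simp_rw [this]
    exact hp
  · intro j hj
    have h1 : (cs.drop b)[j]'(by omega) = cs[b + j]'(by simp [List.length_drop] at hlt' ⊢; omega) := by
      simp [List.getElem_drop]
    rw [h1]
    have hj' : (b + j) - a < m := by omega
    have := hmin ((b + j) - a) hj'
    have h2 : (cs.drop a)[(b + j) - a]'(by simp [List.length_drop] at hlt ⊢; omega) =
        cs[a + ((b + j) - a)]'(by omega) := by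
      simp [List.getElem_drop]
    rw [h2] at this
    have heq : a + ((b + j) - a) = b + j := by omega
    simp_rw [heq] at this
    exact this

-- B's recompute (three finds, filter, min) equals findIdx? pvIsEnd on the suffix
theorem pvRecompute_eq (cs : List Char) (i : Nat) (hi : i ≤ cs.length) :
    PySem.List.min?
      ([PySem.Chars.findFrom cs [' '] (i : Int), PySem.Chars.findFrom cs ['+'] (i : Int),
        PySem.Chars.findFrom cs ['#'] (i : Int)].filter (fun k => k ≠ -1)) (fun k => k) =
      (List.findIdx? pvIsEnd (cs.drop i)).map (fun f => ((i + f : Nat) : Int)) := by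
  have hdec2 : ∀ m k : Nat, ((m : Int) + (k : Int) ≠ -1) := fun m k => by omega
  rw [pvFindFrom_single cs ' ' i hi, pvFindFrom_single cs '+' i hi,
    pvFindFrom_single cs '#' i hi, pvFindIdx_isEnd (cs.drop i)]
  cases h1 : List.findIdx? (· == ' ') (cs.drop i) <;>
    cases h2 : List.findIdx? (· == '+') (cs.drop i) <;>
      cases h3 : List.findIdx? (· == '#') (cs.drop i)
  all_goals simp [hdec2, PySem.List.min?, pvOMin]
  all_goals try split_ifs
  all_goals simp only [Option.some.injEq, ← Nat.cast_min]
  all_goals norm_cast at *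
  all_goals try omega
  all_goals simp only [Nat.min_def]
  all_goals split_ifs <;> first | rfl | (exfalso; linarith)

-- the main loop invariant: from a dot position i, pvLoopB accumulates exactly A's output
theorem pvLoopB_eq (cs : List Char) (fuel i : Nat) (nxt : Int) (out : List String)
    (hfuel : cs.length - i < fuel) (hi : i < cs.length) (hdot : cs[i]'hi = '.')
    (hinv : (i : Int) ≤ nxt → List.findIdx? pvIsEnd (cs.drop i) = some (nxt.toNat - i)) :
    pvLoopB cs fuel (i : Int) nxt out = out ++ pvGoA cs (cs.drop i) i := by
  induction fuel generalizing i nxt out with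
  | zero => omega
  | succ fuel ih =>
    have hne : ¬ ((i : Int) = -1) := by omega
    have hdrop : cs.drop i = '.' :: cs.drop (i + 1) := by
      rw [List.drop_eq_getElem_cons hi, hdot]
    have hstep :
        (if nxt < (i : Int) then
          PySem.List.min?
            ([PySem.Chars.findFrom cs [' '] (i : Int), PySem.Chars.findFrom cs ['+'] (i : Int),
              PySem.Chars.findFrom cs ['#'] (i : Int)].filter (fun k => k ≠ -1)) (fun k => k)
        else some nxt) =
          (List.findIdx? pvIsEnd (cs.drop i)).map (fun f => ((i + f : Nat) : Int)) := by
      by_cases hlt : nxt < (i : Int)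
      · rw [if_pos hlt]
        exact pvRecompute_eq cs i (le_of_lt hi)
      · rw [if_neg hlt]
        rw [hinv (by omega)]
        simp only [Option.map_some, Option.some.injEq]
        omega
    simp only [pvLoopB, hne, if_false, hstep]
    cases hE : List.findIdx? pvIsEnd (cs.drop i) with
    | none =>
      simp only [Option.map_none]
      rw [pvGoA_no_end cs (cs.drop i) i hE, List.append_nil]
    | some f =>
      -- f ≥ 1 and the first end character in the tail is at relative index f - 1
      have hfrest : List.findIdx? pvIsEnd (cs.drop (i + 1)) = some (f - 1) ∧ 1 ≤ f := by
        rw [hdrop, List.findIdx?_cons] at hE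
        have : pvIsEnd '.' = false := by decide
        rw [this] at hE
        simp only [Bool.false_eq_true, if_false] at hE
        cases hr : List.findIdx? pvIsEnd (cs.drop (i + 1)) with
        | none => rw [hr] at hE; simp at hE
        | some g =>
          rw [hr] at hE
          simp at hE
          exact ⟨by (congr 1; omega), by omega⟩
      simp only [Option.map_some]
      rw [hdrop, pvGoA_dot_some cs (cs.drop (i + 1)) i (f - 1) hfrest.1]
      have hslice : ((i : Int) + 1 + ((f - 1 : Nat) : Int)) = ((i + f : Nat) : Int) := by
        have := hfrest.2; push_cast; omega
      rw [hslice]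
      have hi1 : i + 1 ≤ cs.length := hi
      have hnext : ((i : Int) + 1) = (((i + 1 : Nat) : Int)) := by push_cast; ring
      rw [hnext, pvFindFrom_single cs '.' (i + 1) hi1]
      cases hD : List.findIdx? (· == '.') (cs.drop (i + 1)) with
      | none =>
        simp only []
        rw [pvGoA_no_dot cs (cs.drop (i + 1)) (i + 1) hD]
        cases fuel with
        | zero => simp [pvLoopB]
        | succ g => simp [pvLoopB]
      | some r =>
        simp only []
        -- properties of the next dot position i' = i + 1 + r
        have hr := hD
        rw [List.findIdx?_eq_some_iff_getElem] at hr
        obtain ⟨hrlt, hrp, _⟩ := hr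
        have hi' : i + 1 + r < cs.length := by
          simp [List.length_drop] at hrlt; omega
        have hdot' : cs[i + 1 + r]'hi' = '.' := by
          have : (cs.drop (i + 1))[r] = cs[i + 1 + r]'hi' := by
            simp [List.getElem_drop]
          rw [this] at hrp
          simpa using hrp
        rw [pvGoA_skip cs (cs.drop (i + 1)) (i + 1) r hD, List.drop_drop]
        have harith : i + 1 + r = r + (i + 1) := by omega
        rw [ih (i + 1 + r) ((i + f : Nat) : Int)
          (out ++ [String.ofList (PySem.List.slice cs (some ((i + 1 : Nat) : Int)) (some ((i + f : Nat) : Int)))])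
          (by omega) hi' hdot' ?_]
        · simp [harith]
        · intro hle
          have := pvFindIdx_drop_shift cs i (i + 1 + r) f hE (by omega) (by omega)
          rw [this]
          congr 1

-- ===== VERDICT (by name: the statement is the Claim_ definition above) =====
theorem removeExtra_spec : Claim_equal_removeExtra := by
  intro game _
  unfold Spec_removeExtra removeExtra removeExtra_alt
  set cs := game.toList with hcs
  simp only
  rw [pvFind_single]
  cases hd : List.findIdx? (· == '.') cs with
  | none =>
    rw [pvGoA_no_dot cs cs 0 hd]
    rfl
  | some d =>
    have hdlt : d < cs.length ∧ cs[d]'(by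
        rw [List.findIdx?_eq_some_iff_getElem] at hd
        exact hd.1) = '.' := by
      rw [List.findIdx?_eq_some_iff_getElem] at hd
      obtain ⟨h1, h2, _⟩ := hd
      exact ⟨h1, by simpa using h2⟩
    rw [pvGoA_skip cs cs 0 d hd]
    simp only [Nat.zero_add]
    rw [pvLoopB_eq cs (cs.length + 1) d (-1) [] (by omega) hdlt.1 hdlt.2
      (by intro h; omega)]
    simp
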